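-- pv_equiv track=rewrite | github.com/mmlacak/crochess | py/run_compiler.py | split_cmd_compiler_args
-- ===== SOURCE A (Python) =====
-- def split_cmd_compiler_args( argv ):
--     arg_sep_count = 0 # 0 --> script argv, 1 --> compile lib argv, 2 --> compile app argv, 3 --> run app argv
--     compiler_args = False
--     linker_args = False
--     executable_args = False
--
--     script_argv = []
--     cc_lib_argv = []
--     cc_app_argv = []
--     exec_app_argv = []
--
--     for index, arg in enumerate( argv ):
--         if arg != '-*-':
--             if index > 0: # index == 0 --> arg == '.../crochess/push.py', i.e. executing script, not an argument
--                 a = arg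
--
--                 if arg_sep_count == 0:
--                     script_argv.append( a )
--                 elif arg_sep_count == 1:
--                     cc_lib_argv.append( a )
--                 elif arg_sep_count == 2:
--                     cc_app_argv.append( a )
--                 elif arg_sep_count == 3:
--                     exec_app_argv.append( a )
--                 else:
--                     raise RuntimeError("Too many arg groups, expected: script.py <args> [-*- [<compile lib args>] [-*- [<compile app args>] [-*- [<run app args>]]]],\nin cmd line: '%s'." % argv)
--         else:
--             arg_sep_count += 1
--
--             if arg_sep_count == 1:
--                 compiler_args = True
--             elif arg_sep_count == 2:
--                 linker_args = True
--             elif arg_sep_count == 3: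
--                 executable_args = True
--
--     # if cc_lib_argv or compiler_args:
--     #     # not empty argv, or explicitly to call with no args
--     #     cc_lib_argv = ['git', 'commit'] + cc_lib_argv
--
--     # if cc_app_argv or linker_args:
--     #     # not empty argv, or explicitly to call with no args
--     #     cc_app_argv = ['git', 'push'] + cc_app_argv
--
--     return (script_argv, cc_lib_argv, cc_app_argv, exec_app_argv)
-- ===== SOURCE B (Python) =====
-- def split_cmd_compiler_args( argv ):
--     # Phase 1: split argv into segments on the '-*-' separator.
--     segments = [ [] ]
--     for arg in argv:
--         if arg == '-*-':
--             segments.append( [] )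
--         else:
--             segments[ -1 ].append( arg )
--
--     # Phase 2: drop argv[0] (the script path), which always lands at the front of segment 0.
--     if segments[ 0 ]:
--         segments[ 0 ] = segments[ 0 ][ 1 : ]
--
--     # Overflow: a real argument after the 4th separator is an error.
--     if any( segments[ 4 : ] ):
--         raise RuntimeError("Too many arg groups, expected: script.py <args> [-*- [<compile lib args>] [-*- [<compile app args>] [-*- [<run app args>]]]],\nin cmd line: '%s'." % argv)
--
--     segments += [ [] ] * ( 4 - len( segments ) )
--     return ( segments[ 0 ], segments[ 1 ], segments[ 2 ], segments[ 3 ] )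
-- ===== Notes on version B (the rewrite author's own statement) =====
-- stated objective: simpler
-- what changed: Replaces A's single interleaved loop (separator counter, per-group if/elif chain onto four named lists, index>0 test) by two phases: one pass splitting argv into a list of segments at each '-*-', then dropping argv[0] from segment 0, checking overflow segments, and padding/assigning the four groups.
import Mathlib
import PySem

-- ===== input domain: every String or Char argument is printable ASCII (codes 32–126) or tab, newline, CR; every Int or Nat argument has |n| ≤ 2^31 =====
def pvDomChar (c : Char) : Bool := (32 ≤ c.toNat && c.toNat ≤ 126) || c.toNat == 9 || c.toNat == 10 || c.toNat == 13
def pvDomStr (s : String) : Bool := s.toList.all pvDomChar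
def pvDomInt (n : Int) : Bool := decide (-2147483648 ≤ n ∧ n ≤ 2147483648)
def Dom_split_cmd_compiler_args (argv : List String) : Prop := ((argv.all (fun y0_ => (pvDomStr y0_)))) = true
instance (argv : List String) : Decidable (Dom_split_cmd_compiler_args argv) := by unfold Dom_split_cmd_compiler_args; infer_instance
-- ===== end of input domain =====

-- B replaces A's single interleaved loop by two phases (split into segments at '-*-', then drop argv[0] and assign); same cost, simpler.

-- ===== PORT A =====
-- A's for-loop over enumerate(argv): recursion with an explicit index counter and the same
-- state (arg_sep_count, the three flags, the four accumulated lists); lists append at the end.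
-- In the final 'else: raise RuntimeError' branch Python raises; those inputs are excluded by
-- Pre_, and the port returns the state accumulated so far there.
def pvALoop (index : Nat) (sepCount : Nat) (compilerArgs linkerArgs executableArgs : Bool)
    (script ccLib ccApp execApp : List String) :
    List String → List String × List String × List String × List String
  | [] => (script, ccLib, ccApp, execApp)
  | arg :: rest =>
    if arg ≠ "-*-" then
      if index > 0 then
        if sepCount = 0 then
          pvALoop (index + 1) sepCount compilerArgs linkerArgs executableArgs
            (script ++ [arg]) ccLib ccApp execApp rest
        else if sepCount = 1 then
          pvALoop (index + 1) sepCount compilerArgs linkerArgs executableArgs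
            script (ccLib ++ [arg]) ccApp execApp rest
        else if sepCount = 2 then
          pvALoop (index + 1) sepCount compilerArgs linkerArgs executableArgs
            script ccLib (ccApp ++ [arg]) execApp rest
        else if sepCount = 3 then
          pvALoop (index + 1) sepCount compilerArgs linkerArgs executableArgs
            script ccLib ccApp (execApp ++ [arg]) rest
        else
          -- Python raises RuntimeError here (excluded by Pre_)
          (script, ccLib, ccApp, execApp)
      else
        pvALoop (index + 1) sepCount compilerArgs linkerArgs executableArgs
          script ccLib ccApp execApp rest
    else
      pvALoop (index + 1) (sepCount + 1)
        (if sepCount + 1 = 1 then true else compilerArgs)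
        (if sepCount + 1 = 2 then true else linkerArgs)
        (if sepCount + 1 = 3 then true else executableArgs)
        script ccLib ccApp execApp rest

def split_cmd_compiler_args (argv : List String) : List String × List String × List String × List String :=
  pvALoop 0 0 false false false [] [] [] [] argv

-- ===== PORT B =====
-- Phase 1 of Source B: one fold building the segments (closed segments kept reversed, current segment open).
def pvBSplit (st : List (List String) × List String) (arg : String) : List (List String) × List String :=
  if arg = "-*-" then (st.2 :: st.1, []) else (st.1, st.2 ++ [arg])

def split_cmd_compiler_args_alt (argv : List String) : List String × List String × List String × List String :=
  let st := argv.foldl pvBSplit ([], [])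
  let segments := (st.2 :: st.1).reverse
  -- Phase 2: drop argv[0] from segment 0 if segment 0 is non-empty
  let segments :=
    match segments with
    | [] => []  -- unreachable: segments is always non-empty
    | s0 :: rest => (if s0 = [] then s0 else s0.tail) :: rest
  -- Source B raises RuntimeError if any segment past index 3 is non-empty (excluded by Pre_);
  -- otherwise it pads with empty lists and returns the first four segments.
  let g := segments ++ List.replicate (4 - segments.length) ([] : List String)
  (g.getD 0 [], g.getD 1 [], g.getD 2 [], g.getD 3 [])

-- ===== PRECONDITION & SPEC =====
-- Pre_ excludes exactly the inputs on which A raises RuntimeError: those containing a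
-- non-'-*-' argument after the fourth '-*-' separator (B raises the same error there).
def Pre_split_cmd_compiler_args (argv : List String) : Prop :=
  ∀ i, i < argv.length → 4 ≤ (argv.take i).count "-*-" → argv.getD i "" = "-*-"
instance (argv : List String) : Decidable (Pre_split_cmd_compiler_args argv) := by
  unfold Pre_split_cmd_compiler_args; infer_instance

def pvWitness_split_cmd_compiler_args : List String := ["script.py", "a", "-*-", "b", "-*-", "-*-", "c"]

def Spec_split_cmd_compiler_args (argv : List String) (out : List String × List String × List String × List String) : Prop := out = split_cmd_compiler_args_alt argv
instance (argv : List String) (out : List String × List String × List String × List String) : Decidable (Spec_split_cmd_compiler_args argv out) := by unfold Spec_split_cmd_compiler_args; infer_instance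

-- ===== CLAIM (what is proved, stated in full; the proofs are below) =====
def Claim_equal_split_cmd_compiler_args : Prop := ∀ (argv : List String), Dom_split_cmd_compiler_args argv → Pre_split_cmd_compiler_args argv → Spec_split_cmd_compiler_args argv (split_cmd_compiler_args argv)

-- ===== LEMMAS AND PROOFS =====

-- the segments of l, as (first segment, remaining segments)
def pvSegs : List String → List String × List (List String)
  | [] => ([], [])
  | x :: xs =>
    let r := pvSegs xs
    if x = "-*-" then ([], r.1 :: r.2) else (x :: r.1, r.2)

def pvSeglist (l : List String) : List (List String) := (pvSegs l).1 :: (pvSegs l).2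

-- the group that ends up at output slot j when splitting l starting with sepCount c
def pvGr (j c : Nat) (l : List String) : List String :=
  if c ≤ j then (pvSeglist l).getD (j - c) [] else []

-- "no real argument once sepCount exceeds 3", relative to the starting count c
def pvOk : Nat → List String → Bool
  | _, [] => true
  | c, x :: xs => if x = "-*-" then pvOk (c + 1) xs else (decide (c ≤ 3) && pvOk c xs)

theorem pvOk_of_pre (l : List String) (c : Nat)
    (h : ∀ i, i < l.length → 4 ≤ c + (l.take i).count "-*-" → l.getD i "" = "-*-") :
    pvOk c l = true := by
  induction l generalizing c with
  | nil => rfl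
  | cons x xs ih =>
    by_cases hx : x = "-*-"
    · simp only [pvOk, hx]
      apply ih
      intro i hi hc
      have := h (i + 1) (by simpa using hi) (by simp [hx]; omega)
      simpa using this
    · simp only [pvOk, if_neg hx, Bool.and_eq_true, decide_eq_true_eq]
      constructor
      · by_contra hc
        have := h 0 (by simp) (by simp; omega)
        simp at this; exact hx this
      · apply ih
        intro i hi hc
        have := h (i + 1) (by simpa using hi) (by simp [hx]; omega)
        simpa using this

theorem pvGr_sep (j c : Nat) (xs : List String) :
    pvGr j c ("-*-" :: xs) = pvGr j (c + 1) xs := by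
  simp only [pvGr, pvSeglist]
  have hs : pvSegs ("-*-" :: xs) = ([], (pvSegs xs).1 :: (pvSegs xs).2) := by
    simp [pvSegs]
  rw [hs]
  rcases Nat.lt_trichotomy j c with h | h | h
  · rw [if_neg (by omega), if_neg (by omega)]
  · subst h
    rw [if_pos (le_refl _), if_neg (by omega)]
    simp
  · rw [if_pos (by omega), if_pos (by omega)]
    have h2 : j - c = (j - (c + 1)) + 1 := by omega
    rw [h2]
    simp

theorem pvGr_nonsep (j c : Nat) (x : String) (xs : List String) (hx : ¬ x = "-*-") :
    pvGr j c (x :: xs) = if j = c then x :: pvGr j c xs else pvGr j c xs := by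
  simp only [pvGr, pvSeglist]
  have hs : pvSegs (x :: xs) = (x :: (pvSegs xs).1, (pvSegs xs).2) := by
    simp [pvSegs, hx]
  rw [hs]
  by_cases h : j = c
  · subst h
    rw [if_pos rfl, if_pos (le_refl _), if_pos (le_refl _)]
    simp
  · rw [if_neg h]
    rcases Nat.lt_trichotomy j c with h' | h' | h'
    · rw [if_neg (by omega), if_neg (by omega)]
    · exact absurd h' h
    · rw [if_pos (by omega), if_pos (by omega)]
      have h2 : j - c = (j - c - 1) + 1 := by omega
      rw [h2]
      simp

theorem pvGr_nil (j c : Nat) : pvGr j c [] = [] := by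
  simp only [pvGr, pvSeglist, pvSegs]
  by_cases h : c ≤ j
  · rw [if_pos h]
    cases hjc : j - c <;> simp
  · rw [if_neg h]

theorem pvALoop_eq (l : List String) (c i : Nat) (hi : 0 < i)
    (cb lb eb : Bool) (s0 s1 s2 s3 : List String) (hok : pvOk c l = true) :
    pvALoop i c cb lb eb s0 s1 s2 s3 l =
      (s0 ++ pvGr 0 c l, s1 ++ pvGr 1 c l, s2 ++ pvGr 2 c l, s3 ++ pvGr 3 c l) := by
  induction l generalizing c i cb lb eb s0 s1 s2 s3 with
  | nil => simp [pvALoop, pvGr_nil]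
  | cons x xs ih =>
    by_cases hx : x = "-*-"
    · subst hx
      have hok' : pvOk (c + 1) xs = true := by simpa [pvOk] using hok
      simp only [pvALoop, ne_eq, not_true_eq_false, if_false]
      rw [ih (c + 1) (i + 1) (by omega) _ _ _ _ _ _ _ hok']
      simp [pvGr_sep]
    · have hok' : c ≤ 3 ∧ pvOk c xs = true := by
        simpa [pvOk, hx] using hok
      obtain ⟨hc3, hokx⟩ := hok'
      simp only [pvALoop, ne_eq, if_pos hx, if_pos hi]
      rw [pvGr_nonsep 0 c _ _ hx, pvGr_nonsep 1 c _ _ hx,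
          pvGr_nonsep 2 c _ _ hx, pvGr_nonsep 3 c _ _ hx]
      interval_cases c
      · rw [if_pos rfl, ih _ (i + 1) (by omega) _ _ _ _ _ _ _ hokx]
        simp
      · rw [if_neg (by omega), if_pos rfl, ih _ (i + 1) (by omega) _ _ _ _ _ _ _ hokx]
        simp
      · rw [if_neg (by omega), if_neg (by omega), if_pos rfl,
            ih _ (i + 1) (by omega) _ _ _ _ _ _ _ hokx]
        simp
      · rw [if_neg (by omega), if_neg (by omega), if_neg (by omega), if_pos rfl,
            ih _ (i + 1) (by omega) _ _ _ _ _ _ _ hokx]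
        simp

theorem pvFoldB (l : List String) (rd : List (List String)) (cur : List String) :
    (((l.foldl pvBSplit (rd, cur)).2 :: (l.foldl pvBSplit (rd, cur)).1).reverse)
      = rd.reverse ++ ((cur ++ (pvSegs l).1) :: (pvSegs l).2) := by
  induction l generalizing rd cur with
  | nil => simp [pvSegs]
  | cons x xs ih =>
    by_cases hx : x = "-*-"
    · simp only [List.foldl_cons, pvBSplit, hx]
      rw [ih]
      simp [pvSegs]
    · simp only [List.foldl_cons, pvBSplit, if_neg hx]
      rw [ih]
      simp [pvSegs, hx]

theorem pvGetD_pad (l : List (List String)) (j n : Nat) :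
    (l ++ List.replicate n ([] : List String)).getD j [] = l.getD j [] := by
  induction l generalizing j with
  | nil =>
    induction n generalizing j with
    | zero => simp
    | succ m ihm =>
      cases j with
      | zero => simp [List.replicate_succ]
      | succ k => simp only [List.replicate_succ, List.cons_append, List.getD_cons_succ, List.nil_append]; exact ihm k
  | cons a as ih =>
    cases j with
    | zero => simp
    | succ k => simpa using ih k

theorem pvAltB (argv : List String) :
    split_cmd_compiler_args_alt argv =
      (let segments :=
        match pvSeglist argv with
        | [] => []
        | s0 :: rest => (if s0 = [] then s0 else s0.tail) :: rest
      (segments.getD 0 [], segments.getD 1 [], segments.getD 2 [], segments.getD 3 [])) := by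
  have hseg := pvFoldB argv [] []
  simp only [List.reverse_nil, List.nil_append, List.nil_append] at hseg
  simp only [split_cmd_compiler_args_alt]
  rw [hseg]
  simp only [pvSeglist, pvGetD_pad]

-- ===== VERDICT (by name: the statement is the Claim_ definition above) =====
theorem split_cmd_compiler_args_spec : Claim_equal_split_cmd_compiler_args := by
  intro argv _ hpre
  unfold Spec_split_cmd_compiler_args
  rw [pvAltB]
  cases argv with
  | nil => decide
  | cons x xs =>
    by_cases hx : x = "-*-"
    · subst hx
      have hok : pvOk 1 xs = true := by
        apply pvOk_of_pre
        intro i hi hc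
        have := hpre (i + 1) (by simpa using hi) (by simp; omega)
        simpa using this
      show pvALoop 0 0 false false false [] [] [] [] ("-*-" :: xs) = _
      simp only [pvALoop, ne_eq, not_true_eq_false, if_false]
      rw [pvALoop_eq xs 1 1 (by omega) _ _ _ _ _ _ _ hok]
      simp [pvSeglist, pvSegs, pvGr]
    · have hok : pvOk 0 xs = true := by
        apply pvOk_of_pre
        intro i hi hc
        have := hpre (i + 1) (by simpa using hi) (by simp [hx]; omega)
        simpa using this
      show pvALoop 0 0 false false false [] [] [] [] (x :: xs) = _
      simp only [pvALoop, ne_eq, if_pos hx]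
      rw [if_neg (by omega), pvALoop_eq xs 0 1 (by omega) _ _ _ _ _ _ _ hok]
      simp [pvSeglist, pvSegs, pvGr, hx]
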